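-- pv_equiv track=rewrite | github.com/kody-w/RAR | agents/@aibast-agents-library/b2b_sales_stacks/account_intelligence_stack/account_intelligence_orchestrator.py | _pipeline_health
-- ===== SOURCE A (Python) =====
-- _PIPELINES = {
--     "full_briefing": {
--         "id": "pipe-001",
--         "name": "Full Account Briefing",
--         "stages": [
--             {
--                 "stage": 1, "name": "Data Collection",
--                 "agents": ["AccountProfileAgent", "AccountHealthScoreAgent"],
--                 "avg_duration_sec": 4.2, "parallel": True,
--             },
--             {
--                 "stage": 2, "name": "Stakeholder Analysis",
--                 "agents": ["StakeholderMappingAgent", "EngagementTrackerAgent"],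
--                 "avg_duration_sec": 6.8, "parallel": True,
--             },
--             {
--                 "stage": 3, "name": "Market Intelligence",
--                 "agents": ["CompetitiveIntelligenceAgent", "NewsMonitorAgent"],
--                 "avg_duration_sec": 5.1, "parallel": True,
--             },
--             {
--                 "stage": 4, "name": "Risk & Messaging",
--                 "agents": ["DealRiskAssessmentAgent", "ValueMessagingAgent"],
--                 "avg_duration_sec": 3.9, "parallel": True,
--             },
--             {
--                 "stage": 5, "name": "Briefing Assembly",
--                 "agents": ["BriefingDocumentAgent"],
--                 "avg_duration_sec": 2.3, "parallel": False,
--             },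
--         ],
--     },
--     "quick_snapshot": {
--         "id": "pipe-002",
--         "name": "Quick Account Snapshot",
--         "stages": [
--             {
--                 "stage": 1, "name": "Core Data",
--                 "agents": ["AccountProfileAgent"],
--                 "avg_duration_sec": 3.1, "parallel": False,
--             },
--             {
--                 "stage": 2, "name": "Health Check",
--                 "agents": ["AccountHealthScoreAgent"],
--                 "avg_duration_sec": 2.4, "parallel": False,
--             },
--         ],
--     },
--     "competitive_deep_dive": {
--         "id": "pipe-003",
--         "name": "Competitive Deep Dive",
--         "stages": [
--             {
--                 "stage": 1, "name": "Competitor Scan",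
--                 "agents": ["CompetitiveIntelligenceAgent", "NewsMonitorAgent"],
--                 "avg_duration_sec": 5.5, "parallel": True,
--             },
--             {
--                 "stage": 2, "name": "Win/Loss Analysis",
--                 "agents": ["WinLossAnalyzerAgent"],
--                 "avg_duration_sec": 4.7, "parallel": False,
--             },
--             {
--                 "stage": 3, "name": "Battlecard Generation",
--                 "agents": ["BattlecardGeneratorAgent"],
--                 "avg_duration_sec": 3.2, "parallel": False,
--             },
--         ],
--     },
-- }
--
-- _AGENT_HEALTH = {
--     "AccountProfileAgent": {"status": "healthy", "avg_latency_ms": 1120, "success_rate": 99.2, "last_invocation": "2025-03-14T14:30:02Z"},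
--     "AccountHealthScoreAgent": {"status": "healthy", "avg_latency_ms": 890, "success_rate": 98.7, "last_invocation": "2025-03-14T14:30:02Z"},
--     "StakeholderMappingAgent": {"status": "healthy", "avg_latency_ms": 2340, "success_rate": 97.5, "last_invocation": "2025-03-14T14:30:09Z"},
--     "EngagementTrackerAgent": {"status": "healthy", "avg_latency_ms": 1560, "success_rate": 99.1, "last_invocation": "2025-03-14T14:30:09Z"},
--     "CompetitiveIntelligenceAgent": {"status": "degraded", "avg_latency_ms": 3450, "success_rate": 94.3, "last_invocation": "2025-03-14T14:30:15Z"},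
--     "NewsMonitorAgent": {"status": "healthy", "avg_latency_ms": 1890, "success_rate": 98.0, "last_invocation": "2025-03-14T14:30:15Z"},
--     "DealRiskAssessmentAgent": {"status": "healthy", "avg_latency_ms": 1340, "success_rate": 99.4, "last_invocation": "2025-03-14T14:30:19Z"},
--     "ValueMessagingAgent": {"status": "healthy", "avg_latency_ms": 1120, "success_rate": 99.6, "last_invocation": "2025-03-14T14:30:19Z"},
--     "BriefingDocumentAgent": {"status": "healthy", "avg_latency_ms": 2100, "success_rate": 99.8, "last_invocation": "2025-03-14T09:12:22Z"},
--     "WinLossAnalyzerAgent": {"status": "healthy", "avg_latency_ms": 2780, "success_rate": 97.9, "last_invocation": "2025-03-13T16:45:00Z"},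
--     "BattlecardGeneratorAgent": {"status": "healthy", "avg_latency_ms": 1950, "success_rate": 98.5, "last_invocation": "2025-03-13T16:49:00Z"},
-- }
--
-- def _pipeline_health(pipeline_key):
--     """Assess overall pipeline health from agent health data."""
--     pipe = _PIPELINES.get(pipeline_key)
--     if not pipe:
--         return "unknown"
--     agents = set()
--     for stage in pipe["stages"]:
--         agents.update(stage["agents"])
--     statuses = [_AGENT_HEALTH.get(a, {}).get("status", "unknown") for a in agents]
--     if all(s == "healthy" for s in statuses):
--         return "healthy"
--     if any(s == "down" for s in statuses):
--         return "degraded"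
--     return "warning"
-- ===== SOURCE B (Python) =====
-- # B: rank-based aggregation — map each status to a numeric severity (healthy=0,
-- # down=2, other=1), take the max over the pipeline's agents, and index a label
-- # table; replaces A's set + status list + two all/any scans.
-- _PIPELINES = {
--     "full_briefing": {
--         "id": "pipe-001",
--         "name": "Full Account Briefing",
--         "stages": [
--             {"stage": 1, "name": "Data Collection",
--              "agents": ["AccountProfileAgent", "AccountHealthScoreAgent"],
--              "avg_duration_sec": 4.2, "parallel": True},
--             {"stage": 2, "name": "Stakeholder Analysis",
--              "agents": ["StakeholderMappingAgent", "EngagementTrackerAgent"],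
--              "avg_duration_sec": 6.8, "parallel": True},
--             {"stage": 3, "name": "Market Intelligence",
--              "agents": ["CompetitiveIntelligenceAgent", "NewsMonitorAgent"],
--              "avg_duration_sec": 5.1, "parallel": True},
--             {"stage": 4, "name": "Risk & Messaging",
--              "agents": ["DealRiskAssessmentAgent", "ValueMessagingAgent"],
--              "avg_duration_sec": 3.9, "parallel": True},
--             {"stage": 5, "name": "Briefing Assembly",
--              "agents": ["BriefingDocumentAgent"],
--              "avg_duration_sec": 2.3, "parallel": False},
--         ],
--     },
--     "quick_snapshot": {
--         "id": "pipe-002",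
--         "name": "Quick Account Snapshot",
--         "stages": [
--             {"stage": 1, "name": "Core Data",
--              "agents": ["AccountProfileAgent"],
--              "avg_duration_sec": 3.1, "parallel": False},
--             {"stage": 2, "name": "Health Check",
--              "agents": ["AccountHealthScoreAgent"],
--              "avg_duration_sec": 2.4, "parallel": False},
--         ],
--     },
--     "competitive_deep_dive": {
--         "id": "pipe-003",
--         "name": "Competitive Deep Dive",
--         "stages": [
--             {"stage": 1, "name": "Competitor Scan",
--              "agents": ["CompetitiveIntelligenceAgent", "NewsMonitorAgent"],
--              "avg_duration_sec": 5.5, "parallel": True},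
--             {"stage": 2, "name": "Win/Loss Analysis",
--              "agents": ["WinLossAnalyzerAgent"],
--              "avg_duration_sec": 4.7, "parallel": False},
--             {"stage": 3, "name": "Battlecard Generation",
--              "agents": ["BattlecardGeneratorAgent"],
--              "avg_duration_sec": 3.2, "parallel": False},
--         ],
--     },
-- }
--
-- _AGENT_HEALTH = {
--     "AccountProfileAgent": {"status": "healthy", "avg_latency_ms": 1120, "success_rate": 99.2, "last_invocation": "2025-03-14T14:30:02Z"},
--     "AccountHealthScoreAgent": {"status": "healthy", "avg_latency_ms": 890, "success_rate": 98.7, "last_invocation": "2025-03-14T14:30:02Z"},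
--     "StakeholderMappingAgent": {"status": "healthy", "avg_latency_ms": 2340, "success_rate": 97.5, "last_invocation": "2025-03-14T14:30:09Z"},
--     "EngagementTrackerAgent": {"status": "healthy", "avg_latency_ms": 1560, "success_rate": 99.1, "last_invocation": "2025-03-14T14:30:09Z"},
--     "CompetitiveIntelligenceAgent": {"status": "degraded", "avg_latency_ms": 3450, "success_rate": 94.3, "last_invocation": "2025-03-14T14:30:15Z"},
--     "NewsMonitorAgent": {"status": "healthy", "avg_latency_ms": 1890, "success_rate": 98.0, "last_invocation": "2025-03-14T14:30:15Z"},
--     "DealRiskAssessmentAgent": {"status": "healthy", "avg_latency_ms": 1340, "success_rate": 99.4, "last_invocation": "2025-03-14T14:30:19Z"},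
--     "ValueMessagingAgent": {"status": "healthy", "avg_latency_ms": 1120, "success_rate": 99.6, "last_invocation": "2025-03-14T14:30:19Z"},
--     "BriefingDocumentAgent": {"status": "healthy", "avg_latency_ms": 2100, "success_rate": 99.8, "last_invocation": "2025-03-14T09:12:22Z"},
--     "WinLossAnalyzerAgent": {"status": "healthy", "avg_latency_ms": 2780, "success_rate": 97.9, "last_invocation": "2025-03-13T16:45:00Z"},
--     "BattlecardGeneratorAgent": {"status": "healthy", "avg_latency_ms": 1950, "success_rate": 98.5, "last_invocation": "2025-03-13T16:49:00Z"},
-- }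
--
-- # severity lattice: healthy < (anything else: degraded/unknown/...) < down
-- _SEVERITY = {"healthy": 0, "down": 2}
-- _LABEL = ["healthy", "warning", "degraded"]
--
--
-- def _pipeline_health(pipeline_key):
--     """Assess overall pipeline health from agent health data."""
--     pipe = _PIPELINES.get(pipeline_key)
--     if not pipe:
--         return "unknown"
--     severity = max(
--         (_SEVERITY.get(_AGENT_HEALTH.get(a, {}).get("status", "unknown"), 1)
--          for stage in pipe["stages"] for a in stage["agents"]),
--         default=0,
--     )
--     return _LABEL[severity]
-- ===== Notes on version B (the rewrite author's own statement) =====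
-- stated objective: alternative
-- what changed: B replaces A's agent set, status list and two separate all/any scans by a numeric severity lattice: each status is ranked (healthy=0, down=2, otherwise 1), the maximum rank over the pipeline's agents is taken in one reduction, and the result is read from a label table.
import Mathlib
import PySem

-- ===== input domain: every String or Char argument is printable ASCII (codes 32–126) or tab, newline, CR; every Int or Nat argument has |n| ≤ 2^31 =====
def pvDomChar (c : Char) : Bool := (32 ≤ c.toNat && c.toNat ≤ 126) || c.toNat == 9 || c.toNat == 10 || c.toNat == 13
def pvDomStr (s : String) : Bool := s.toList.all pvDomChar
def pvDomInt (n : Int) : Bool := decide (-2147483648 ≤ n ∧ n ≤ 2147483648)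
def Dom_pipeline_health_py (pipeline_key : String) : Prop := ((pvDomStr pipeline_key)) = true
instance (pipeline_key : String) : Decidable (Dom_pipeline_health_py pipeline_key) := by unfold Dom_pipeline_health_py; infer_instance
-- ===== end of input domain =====

-- B aggregates via a numeric severity lattice (healthy=0, down=2, other=1): max rank
-- over the agents, then a label-table lookup — instead of A's set + two all/any scans
-- (objective: alternative, same cost).
-- Module-level data: _pipeline_health reads only pipe["stages"][i]["agents"] and
-- _AGENT_HEALTH[a]["status"]; the unused float/metadata fields are omitted from
-- the ported tables (they cannot affect the result).

-- ===== PORT A =====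
-- _PIPELINES, restricted to the "stages" → "agents" fields the function reads
def pvPipelines : PySem.Dict String (List (List String)) := PySem.Dict.mk
  [ ("full_briefing",
      [ ["AccountProfileAgent", "AccountHealthScoreAgent"],
        ["StakeholderMappingAgent", "EngagementTrackerAgent"],
        ["CompetitiveIntelligenceAgent", "NewsMonitorAgent"],
        ["DealRiskAssessmentAgent", "ValueMessagingAgent"],
        ["BriefingDocumentAgent"] ]),
    ("quick_snapshot",
      [ ["AccountProfileAgent"],
        ["AccountHealthScoreAgent"] ]),
    ("competitive_deep_dive",
      [ ["CompetitiveIntelligenceAgent", "NewsMonitorAgent"],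
        ["WinLossAnalyzerAgent"],
        ["BattlecardGeneratorAgent"] ]) ]

-- _AGENT_HEALTH, restricted to the "status" field the function reads
def pvAgentStatus : PySem.Dict String String := PySem.Dict.mk
  [ ("AccountProfileAgent", "healthy"),
    ("AccountHealthScoreAgent", "healthy"),
    ("StakeholderMappingAgent", "healthy"),
    ("EngagementTrackerAgent", "healthy"),
    ("CompetitiveIntelligenceAgent", "degraded"),
    ("NewsMonitorAgent", "healthy"),
    ("DealRiskAssessmentAgent", "healthy"),
    ("ValueMessagingAgent", "healthy"),
    ("BriefingDocumentAgent", "healthy"),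
    ("WinLossAnalyzerAgent", "healthy"),
    ("BattlecardGeneratorAgent", "healthy") ]

-- Python iterates the agent SET to build `statuses`; that list is consumed only by
-- order-independent all/any, so iterating in the Set's first-insertion order is exact.
def pipeline_health_py (pipeline_key : String) : String :=
  match pvPipelines.get? pipeline_key with
  | none => "unknown"   -- `if not pipe` (every stored pipeline dict is non-empty, hence truthy)
  | some stages =>
    let agents : PySem.Set String :=
      stages.foldl (fun s ag => PySem.Set.update s ag) PySem.Set.empty
    let statuses : List String :=
      agents.map (fun a => (pvAgentStatus.get? a).getD "unknown")
    if statuses.all (fun s => s == "healthy") then "healthy"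
    else if statuses.any (fun s => s == "down") then "degraded"
    else "warning"

-- ===== PORT B =====
-- _SEVERITY and _LABEL from Source B
def pvSeverity : PySem.Dict String Int := PySem.Dict.mk [("healthy", 0), ("down", 2)]
def pvLabels : List String := ["healthy", "warning", "degraded"]

-- max(generator, default=0) ported as foldl max 0 over the flattened agents;
-- _LABEL[severity] via pyGet? (severity is always 0/1/2, so `some`; getD "" is unreachable)
def pipeline_health_py_alt (pipeline_key : String) : String :=
  match pvPipelines.get? pipeline_key with
  | none => "unknown"
  | some stages =>
    let severity : Int :=
      (stages.flatMap (fun ag => ag)).foldl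
        (fun m a =>
          max m ((pvSeverity.get? ((pvAgentStatus.get? a).getD "unknown")).getD 1))
        0
    (PySem.List.pyGet? pvLabels severity).getD ""

-- ===== PRECONDITION & SPEC =====
def Spec_pipeline_health_py (pipeline_key : String) (out : String) : Prop := out = pipeline_health_py_alt pipeline_key
instance (pipeline_key : String) (out : String) : Decidable (Spec_pipeline_health_py pipeline_key out) := by unfold Spec_pipeline_health_py; infer_instance

-- ===== CLAIM (what is proved, stated in full; the proofs are below) =====
def Claim_equal_pipeline_health_py : Prop := ∀ (pipeline_key : String), Dom_pipeline_health_py pipeline_key → Spec_pipeline_health_py pipeline_key (pipeline_health_py pipeline_key)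

-- ===== LEMMAS AND PROOFS =====
theorem pvPipelines_get?_none (k : String)
    (h1 : k ≠ "full_briefing") (h2 : k ≠ "quick_snapshot") (h3 : k ≠ "competitive_deep_dive") :
    pvPipelines.get? k = none := by
  simp [pvPipelines, h1, h2, h3, Ne.symm, PySem.Dict.get?]

-- ===== VERDICT (by name: the statement is the Claim_ definition above) =====
theorem pipeline_health_py_spec : Claim_equal_pipeline_health_py := by
  intro key _
  unfold Spec_pipeline_health_py
  by_cases h1 : key = "full_briefing"
  · subst h1; decide
  by_cases h2 : key = "quick_snapshot"
  · subst h2; decide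
  by_cases h3 : key = "competitive_deep_dive"
  · subst h3; decide
  unfold pipeline_health_py pipeline_health_py_alt
  rw [pvPipelines_get?_none key h1 h2 h3]
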